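-- pv_equiv track=rewrite | github.com/rbose99/CodeSignal-Problems | Arcade Intro/10. commonCharacterCount.py | solution
-- ===== SOURCE A (Python) =====
-- def solution(s1, s2):
--     d1={}
--     d2={}
--     for i in range(len(s1)):
--         if s1[i] in d1.keys():
--             d1[s1[i]]+=1
--         else:
--             d1[s1[i]]=1
--     for i in range(len(s2)):
--         if s2[i] in d2.keys():
--             d2[s2[i]]+=1
--         else:
--             d2[s2[i]]=1
--     tot=0
--     for k in d1.keys():
--         if k in d2.keys():
--             tot+=min(d1[k],d2[k])
--     return tot
-- ===== SOURCE B (Python) =====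
-- def solution(s1, s2):
--     # Greedy one-pass matching: consume each character of s1 from a pool of s2's
--     # characters; the number of successful matches is the common character count.
--     pool = list(s2)
--     tot = 0
--     for c in s1:
--         if c in pool:
--             pool.remove(c)
--             tot += 1
--     return tot
-- ===== Notes on version B (the rewrite author's own statement) =====
-- stated objective: alternative
-- what changed: Replaces A's two frequency dictionaries and keyed min-summing loop by a single greedy matching pass: each character of s1 is consumed from a mutable pool of s2's characters and the number of matches is returned (no counting at all).
import Mathlib
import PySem

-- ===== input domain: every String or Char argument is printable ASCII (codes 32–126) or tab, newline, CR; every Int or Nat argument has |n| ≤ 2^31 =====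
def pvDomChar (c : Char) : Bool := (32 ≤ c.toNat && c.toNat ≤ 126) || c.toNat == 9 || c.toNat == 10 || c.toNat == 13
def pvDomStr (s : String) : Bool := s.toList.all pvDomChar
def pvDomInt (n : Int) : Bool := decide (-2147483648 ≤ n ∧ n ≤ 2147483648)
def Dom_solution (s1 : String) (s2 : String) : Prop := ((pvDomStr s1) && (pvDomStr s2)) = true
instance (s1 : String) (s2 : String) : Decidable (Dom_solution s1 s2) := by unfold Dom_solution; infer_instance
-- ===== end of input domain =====

-- B replaces A's two frequency dictionaries and keyed min-summing loop by a single
-- greedy matching pass that consumes each char of s1 from a pool of s2's chars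
-- (objective: alternative; same return value everywhere).

-- ===== PORT A =====
-- the two counting loops 'for i in range(len(s)): if s[i] in d: d[s[i]]+=1 else: d[s[i]]=1'
-- (pyGetD's default is never used: i ranges over the valid indices)
def pvBuild (s : List Char) : PySem.Dict Char Int :=
  (PySem.List.pyRange 0 (PySem.List.len s)).foldl
    (fun d i =>
      if d.contains (PySem.List.pyGetD s i ' ') then
        d.insert (PySem.List.pyGetD s i ' ') (d.getD (PySem.List.pyGetD s i ' ') 0 + 1)
      else d.insert (PySem.List.pyGetD s i ' ') 1)
    PySem.Dict.empty

def solution (s1 : String) (s2 : String) : Int :=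
  let d1 := pvBuild s1.toList
  let d2 := pvBuild s2.toList
  -- 'tot=0; for k in d1.keys(): if k in d2.keys(): tot += min(d1[k], d2[k])'
  -- (the getD defaults are never used: k is a key of d1 and, inside the branch, of d2)
  d1.keys.foldl
    (fun tot k => if d2.contains k then tot + min (d1.getD k 0) (d2.getD k 0) else tot) 0

-- ===== PORT B =====
-- 'pool = list(s2); tot = 0; for c in s1: if c in pool: pool.remove(c); tot += 1'
-- (the 'none' arm of remove? is unreachable: it is guarded by 'c in pool')
def solution_alt (s1 : String) (s2 : String) : Int :=
  (s1.toList.foldl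
    (fun st c =>
      if st.1.contains c then
        match PySem.List.remove? st.1 c with
        | some rest => (rest, st.2 + 1)
        | none => st
      else st)
    (s2.toList, (0 : Int))).2

-- ===== PRECONDITION & SPEC =====
def Spec_solution (s1 : String) (s2 : String) (out : Int) : Prop := out = solution_alt s1 s2
instance (s1 : String) (s2 : String) (out : Int) : Decidable (Spec_solution s1 s2 out) := by unfold Spec_solution; infer_instance

-- ===== CLAIM (what is proved, stated in full; the proofs are below) =====
def Claim_equal_solution : Prop := ∀ (s1 : String) (s2 : String), Dom_solution s1 s2 → Spec_solution s1 s2 (solution s1 s2)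

-- ===== LEMMAS AND PROOFS =====

-- A's counting loop builds exactly Counter(s)
theorem pvBuild_eq_counter (s : List Char) : pvBuild s = PySem.Dict.counter s := by
  have h := PySem.List.foldl_pyRange_pyGetD s ' '
      (fun d c => if d.contains c then d.insert c (d.getD c 0 + 1) else d.insert c 1)
      (PySem.Dict.empty : PySem.Dict Char Int) (le_refl 0)
  simp only [Int.toNat_zero, List.drop_zero] at h
  unfold pvBuild
  refine h.trans ?_
  rw [← PySem.Dict.foldl_insert_getD_add_one_eq_counter]
  apply List.foldl_ext
  intro d c _
  by_cases hc : d.contains c = true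
  · simp [hc]
  · have hfalse : d.contains c = false := by simpa using hc
    have hiso := PySem.Dict.contains_eq_isSome_get? d c
    rw [hfalse] at hiso
    have hnone : d.get? c = none := Option.not_isSome_iff_eq_none.mp (by rw [← hiso]; simp)
    have h0 : d.getD c 0 = 0 := by simp [PySem.Dict.getD, hnone]
    simp [hc, h0]

-- B's greedy matching loop computes the cardinality of the multiset intersection
theorem pvMatch_card :
    ∀ (l1 pool : List Char) (tot : Int),
      (l1.foldl
        (fun st c =>
          if st.1.contains c then
            match PySem.List.remove? st.1 c with
            | some rest => (rest, st.2 + 1)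
            | none => st
          else st)
        (pool, tot)).2
      = tot + (Multiset.card ((↑l1 : Multiset Char) ∩ ↑pool) : Int) := by
  intro l1
  induction l1 with
  | nil => intro pool tot; simp
  | cons c t ih =>
    intro pool tot
    by_cases hmem : c ∈ pool
    · have hcont : pool.contains c = true := by simpa using hmem
      have hrm := PySem.List.remove?_eq_some_erase (v := c) (xs := pool) hmem
      have hinter : ((↑(c :: t) : Multiset Char) ∩ ↑pool)
          = c ::ₘ ((↑t : Multiset Char) ∩ ↑(pool.erase c)) := by
        have := Multiset.cons_inter_of_pos (a := c) (t := (↑pool : Multiset Char))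
          (↑t : Multiset Char) (by simpa using hmem)
        simpa [Multiset.coe_erase] using this
      simp only [List.foldl_cons, hcont, if_pos, hrm, ih, hinter]
      rw [Multiset.card_cons]
      push_cast
      ring
    · have hcont : pool.contains c = false := by simpa using hmem
      have hinter : ((↑(c :: t) : Multiset Char) ∩ ↑pool)
          = ((↑t : Multiset Char) ∩ ↑pool) := by
        have := Multiset.cons_inter_of_neg (a := c) (t := (↑pool : Multiset Char))
          (↑t : Multiset Char) (by simpa using hmem)
        simpa using this
      simp only [List.foldl_cons, hcont, Bool.false_eq_true, if_false, ih, hinter]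

-- the sum of per-character minimum counts over the distinct chars of l1
-- is the cardinality of the multiset intersection (Nat version)
theorem sum_min_counts_eq_card (l1 l2 : List Char) :
    ((PySem.List.dedup l1).map (fun c => min (l1.count c) (l2.count c))).sum
      = Multiset.card ((↑l1 : Multiset Char) ∩ ↑l2) := by
  have hnd : (PySem.List.dedup l1).Nodup := PySem.List.nodup_dedup l1
  rw [← List.sum_toFinset _ hnd]
  have htf : (PySem.List.dedup l1).toFinset = l1.toFinset := by
    ext x; simp
  rw [htf, ← Multiset.toFinset_sum_count_eq ((↑l1 : Multiset Char) ∩ ↑l2)]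
  have hsub : ((↑l1 : Multiset Char) ∩ ↑l2).toFinset ⊆ l1.toFinset := by
    intro a ha
    rw [Multiset.mem_toFinset] at ha
    have := Multiset.mem_of_le (Multiset.inter_le_left) ha
    simpa using this
  have h1 : ∑ a ∈ ((↑l1 : Multiset Char) ∩ ↑l2).toFinset,
        Multiset.count a ((↑l1 : Multiset Char) ∩ ↑l2)
      = ∑ a ∈ ((↑l1 : Multiset Char) ∩ ↑l2).toFinset,
        min (l1.count a) (l2.count a) :=
    Finset.sum_congr rfl (fun a _ => by rw [Multiset.count_inter]; simp)
  rw [h1]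
  exact (Finset.sum_subset hsub (fun a _ ha => by
    rw [Multiset.mem_toFinset] at ha
    have h0 := Multiset.count_eq_zero.mpr ha
    rw [Multiset.count_inter] at h0
    simpa using h0)).symm

-- casting a mapped Nat sum to Int
theorem sum_map_natCast (l : List Char) (f : Char → Nat) :
    (l.map (fun c => ((f c : Nat) : Int))).sum = ((l.map f).sum : Int) := by
  induction l with
  | nil => rfl
  | cons x t ih => simp [ih]

-- ===== VERDICT (by name: the statement is the Claim_ definition above) =====
theorem solution_spec : Claim_equal_solution := by
  intro s1 s2 _
  unfold Spec_solution solution_alt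
  rw [pvMatch_card]
  simp only [solution, pvBuild_eq_counter, PySem.Dict.keys_counter, zero_add]
  have hcong := PySem.List.foldl_congr_mem
      (l := PySem.Set.ofList s1.toList) (init := (0 : Int))
      (f := fun tot k =>
        if (PySem.Dict.counter s2.toList).contains k = true then
          tot + min ((PySem.Dict.counter s1.toList).getD k 0)
            ((PySem.Dict.counter s2.toList).getD k 0)
        else tot)
      (g := fun tot k => tot + min ((s1.toList.count k : Nat) : Int) ((s2.toList.count k : Nat) : Int))
      (by
        intro acc k hk
        by_cases h2 : k ∈ s2.toList
        · have : (PySem.Dict.counter s2.toList).contains k = true := by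
            rw [PySem.Dict.contains_counter]; simpa using h2
          simp [this, PySem.Dict.getD_counter]
        · have : (PySem.Dict.counter s2.toList).contains k = false := by
            rw [PySem.Dict.contains_counter]; simpa using h2
          have hc2 : s2.toList.count k = 0 := List.count_eq_zero.mpr h2
          simp [this, hc2])
  rw [hcong]
  rw [PySem.List.foldl_add]
  have : ((PySem.Set.ofList s1.toList).map
      (fun k => min ((s1.toList.count k : Nat) : Int) ((s2.toList.count k : Nat) : Int)))
      = ((PySem.Set.ofList s1.toList).map
      (fun k => ((min (s1.toList.count k) (s2.toList.count k) : Nat) : Int))) := by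
    apply List.map_congr_left; intro k _; push_cast; rfl
  rw [this, sum_map_natCast, ← PySem.List.dedup_eq_ofList, sum_min_counts_eq_card]
  simp
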